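-- pv_equiv track=rewrite | github.com/JuruoMP/T5-SR | seq2seq/utils/input_collator.py | sql_split
-- ===== SOURCE A (Python) =====
-- def sql_split(text):
--     tokens = text.replace(',', ' ,').replace('  ', ' ').split()
--     new_tokens = []
--     agg_token = []
--     for token in tokens:
--         if agg_token:
--             agg_token.append(token)
--             if agg_token[-1][-1] == agg_token[0][0]:
--                 new_tok = ' '.join(agg_token)
--                 new_tokens.append(new_tok)
--                 agg_token = []
--         else:
--             if token[0] not in ('"', "'"):
--                 new_tokens.append(token)
--             elif token[-1] == token[0]:
--                 new_tokens.append(token)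
--             else:
--                 agg_token.append(token)
--     assert agg_token == []
--     return new_tokens
-- ===== SOURCE B (Python) =====
-- def sql_split(text):
--     tokens = text.replace(',', ' ,').replace('  ', ' ').split()
--     out = []
--     i, n = 0, len(tokens)
--     while i < n:
--         tok = tokens[i]
--         q = tok[0]
--         if q not in ('"', "'") or tok[-1] == q:
--             out.append(tok)
--             i += 1
--         else:
--             j = i + 1
--             while j < n and tokens[j][-1] != q:
--                 j += 1
--             assert j < n
--             out.append(' '.join(tokens[i:j + 1]))
--             i = j + 1
--     return out
-- ===== Notes on version B (the rewrite author's own statement) =====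
-- stated objective: alternative
-- what changed: Replaces A's running-accumulator state machine (agg_token list threaded through one fold) by an index-driven outer loop with an explicit inner scan that finds the closing-quote token and joins the slice tokens[i:j+1] in one step.
import Mathlib
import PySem

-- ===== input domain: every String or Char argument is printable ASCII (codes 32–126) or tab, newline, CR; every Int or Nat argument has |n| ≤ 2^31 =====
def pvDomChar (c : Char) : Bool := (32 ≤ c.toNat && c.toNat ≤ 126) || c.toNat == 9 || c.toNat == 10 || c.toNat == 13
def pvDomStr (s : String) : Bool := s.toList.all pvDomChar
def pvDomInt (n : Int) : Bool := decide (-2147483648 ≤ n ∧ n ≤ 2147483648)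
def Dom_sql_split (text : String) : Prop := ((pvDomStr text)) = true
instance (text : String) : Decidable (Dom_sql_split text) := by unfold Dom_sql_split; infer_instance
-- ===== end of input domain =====

-- B replaces A's running agg_token accumulator by an index loop with an inner closing-quote scan
-- that emits each joined slice in one step (objective: alternative decomposition, same cost).
-- Both Pythons raise AssertionError on an unterminated quote; Pre_ excludes exactly those inputs.

-- tokens are nonempty (they come from .split()), so token[0] / token[-1] are total:
def pvFirst (t : String) : Char := t.toList.headD ' '
def pvLast (t : String) : Char := t.toList.getLastD ' '

def pvTokens (text : String) : List String :=
  PySem.Str.split₀ (PySem.Str.replace (PySem.Str.replace text "," " ,") "  " " ")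

-- ===== PORT A =====
-- A's for-loop over tokens with state (new_tokens = acc, agg_token = agg), branch for branch.
def sqlAggLoop (acc agg : List String) : List String → List String
  | [] => acc      -- A's trailing assert on agg_token: Pre_ guarantees agg = [] here
  | t :: rest =>
    match agg with
    | [] =>
      if pvFirst t ≠ '"' ∧ pvFirst t ≠ '\'' then sqlAggLoop (acc ++ [t]) [] rest
      else if pvLast t = pvFirst t then sqlAggLoop (acc ++ [t]) [] rest
      else sqlAggLoop acc [t] rest
    | a0 :: as =>
      if pvLast t = pvFirst a0 then
        sqlAggLoop (acc ++ [PySem.Str.join " " ((a0 :: as) ++ [t])]) [] rest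
      else sqlAggLoop acc ((a0 :: as) ++ [t]) rest

def sql_split (text : String) : List String :=
  sqlAggLoop [] [] (pvTokens text)

-- ===== PORT B =====
-- Source B's inner scan 'j = i+1; while j < n and tokens[j][-1] != q: j += 1' — returns the offset
-- of the first token (after the opener) whose last char is q, none if the scan falls off the end.
def pvFindClose (q : Char) : List String → Option Nat
  | [] => none
  | t :: rest => if pvLast t = q then some 0 else (pvFindClose q rest).map (· + 1)

-- Source B's outer 'while i < n' loop; the index i is represented by the not-yet-consumed suffix,
-- so tokens[i:j+1] is t :: rest.take (j+1) and 'i = j+1' is rest.drop (j+1).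
def sqlIdxLoop : List String → List String
  | [] => []
  | t :: rest =>
    if (pvFirst t ≠ '"' ∧ pvFirst t ≠ '\'') ∨ pvLast t = pvFirst t then t :: sqlIdxLoop rest
    else
      match pvFindClose (pvFirst t) rest with
      | some j => PySem.Str.join " " (t :: rest.take (j + 1)) :: sqlIdxLoop (rest.drop (j + 1))
      | none => [PySem.Str.join " " (t :: rest)]   -- Source B's 'assert j < n' fails here: outside Pre_
termination_by ts => ts.length
decreasing_by
  all_goals simp [List.length_drop]

def sql_split_alt (text : String) : List String :=
  sqlIdxLoop (pvTokens text)

-- ===== PRECONDITION & SPEC =====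
-- the open-quote state after scanning the tokens: none = no quote pending, some q = an
-- unterminated quote opened by a token whose first char is q (tracks only this one char,
-- not either port's output)
def pvQuoteState : Option Char → List String → Option Char
  | s, [] => s
  | none, t :: rest =>
      pvQuoteState
        (if (pvFirst t = '"' ∨ pvFirst t = '\'') ∧ pvLast t ≠ pvFirst t
         then some (pvFirst t) else none) rest
  | some q, t :: rest => pvQuoteState (if pvLast t = q then none else some q) rest

-- Pre_ excludes exactly the inputs with an unterminated quoted token, where A's trailing
-- assert raises AssertionError (B's inner-scan assert raises there too).
def Pre_sql_split (text : String) : Prop := pvQuoteState none (pvTokens text) = none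
instance (text : String) : Decidable (Pre_sql_split text) := by unfold Pre_sql_split; infer_instance

def pvWitness_sql_split : String := "select 'a b' , c"

def Spec_sql_split (text : String) (out : List String) : Prop := out = sql_split_alt text
instance (text : String) (out : List String) : Decidable (Spec_sql_split text out) := by unfold Spec_sql_split; infer_instance

-- ===== CLAIM (what is proved, stated in full; the proofs are below) =====
def Claim_equal_sql_split : Prop := ∀ (text : String), Dom_sql_split text → Pre_sql_split text → Spec_sql_split text (sql_split text)

-- ===== LEMMAS AND PROOFS =====

theorem sqlAggLoop_open (a0 : String) (l : List String) : ∀ (as acc : List String),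
    sqlAggLoop acc (a0 :: as) l =
      match pvFindClose (pvFirst a0) l with
      | some j =>
          sqlAggLoop (acc ++ [PySem.Str.join " " ((a0 :: as) ++ l.take (j + 1))]) []
            (l.drop (j + 1))
      | none => acc := by
  induction l with
  | nil => intro as acc; simp [sqlAggLoop, pvFindClose]
  | cons t rest ih =>
    intro as acc
    by_cases h : pvLast t = pvFirst a0
    · simp [sqlAggLoop, pvFindClose, h]
    · rw [show sqlAggLoop acc (a0 :: as) (t :: rest)
            = sqlAggLoop acc ((a0 :: as) ++ [t]) rest by simp [sqlAggLoop, h]]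
      rw [show ((a0 :: as) ++ [t]) = a0 :: (as ++ [t]) by simp]
      rw [ih (as ++ [t]) acc]
      simp only [pvFindClose, h, if_false]
      cases hfc : pvFindClose (pvFirst a0) rest with
      | none => simp
      | some j => simp [List.take_succ_cons, List.drop_succ_cons, List.append_assoc]

theorem pvQuoteState_some (l : List String) : ∀ (q : Char),
    pvQuoteState (some q) l =
      match pvFindClose q l with
      | some j => pvQuoteState none (l.drop (j + 1))
      | none => some q := by
  induction l with
  | nil => intro q; simp [pvQuoteState, pvFindClose]
  | cons t rest ih =>
    intro q
    by_cases h : pvLast t = q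
    · simp [pvQuoteState, pvFindClose, h]
    · rw [show pvQuoteState (some q) (t :: rest) = pvQuoteState (some q) rest by
        simp [pvQuoteState, h]]
      rw [ih q]
      simp only [pvFindClose, h, if_false]
      cases hfc : pvFindClose q rest with
      | none => simp
      | some j => simp

theorem loops_agree : ∀ (n : Nat) (l : List String), l.length ≤ n →
    pvQuoteState none l = none →
    ∀ acc, sqlAggLoop acc [] l = acc ++ sqlIdxLoop l := by
  intro n
  induction n with
  | zero =>
    intro l hl _ acc
    have : l = [] := List.eq_nil_of_length_eq_zero (Nat.le_zero.mp hl)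
    subst this; rw [sqlIdxLoop]; simp [sqlAggLoop]
  | succ n ih =>
    intro l hl hq acc
    cases l with
    | nil => rw [sqlIdxLoop]; simp [sqlAggLoop]
    | cons t rest =>
      simp only [List.length_cons, Nat.succ_le_succ_iff] at hl
      by_cases h1 : pvFirst t ≠ '"' ∧ pvFirst t ≠ '\''
      · have hq' : pvQuoteState none rest = none := by
          simpa [pvQuoteState, h1.1, h1.2] using hq
        rw [show sqlAggLoop acc [] (t :: rest) = sqlAggLoop (acc ++ [t]) [] rest by
              simp [sqlAggLoop, h1.1, h1.2],
            show sqlIdxLoop (t :: rest) = t :: sqlIdxLoop rest by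
              simp [sqlIdxLoop, h1.1, h1.2]]
        rw [ih rest hl hq' (acc ++ [t])]; simp
      · have hquote : pvFirst t = '"' ∨ pvFirst t = '\'' := by tauto
        by_cases h2 : pvLast t = pvFirst t
        · have hq' : pvQuoteState none rest = none := by
            simpa [pvQuoteState, h2] using hq
          have hA : sqlAggLoop acc [] (t :: rest) = sqlAggLoop (acc ++ [t]) [] rest := by
            show (if pvFirst t ≠ '"' ∧ pvFirst t ≠ '\'' then sqlAggLoop (acc ++ [t]) [] rest
                  else if pvLast t = pvFirst t then sqlAggLoop (acc ++ [t]) [] rest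
                  else sqlAggLoop acc [t] rest) = sqlAggLoop (acc ++ [t]) [] rest
            rw [if_neg h1, if_pos h2]
          rw [hA, show sqlIdxLoop (t :: rest) = t :: sqlIdxLoop rest by
                simp [sqlIdxLoop, h2]]
          rw [ih rest hl hq' (acc ++ [t])]; simp
        · -- opener: A starts aggregating, B scans for the closer
          have hA : sqlAggLoop acc [] (t :: rest) = sqlAggLoop acc [t] rest := by
            show (if pvFirst t ≠ '"' ∧ pvFirst t ≠ '\'' then sqlAggLoop (acc ++ [t]) [] rest
                  else if pvLast t = pvFirst t then sqlAggLoop (acc ++ [t]) [] rest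
                  else sqlAggLoop acc [t] rest) = sqlAggLoop acc [t] rest
            rw [if_neg h1, if_neg h2]
          have hqs : pvQuoteState (some (pvFirst t)) rest = none := by
            simpa [pvQuoteState, hquote, h2] using hq
          have hcond : ¬((pvFirst t ≠ '"' ∧ pvFirst t ≠ '\'') ∨ pvLast t = pvFirst t) := by
            rintro (⟨hne1, hne2⟩ | hcl)
            · rcases hquote with h | h
              · exact hne1 h
              · exact hne2 h
            · exact h2 hcl
          rw [pvQuoteState_some] at hqs
          cases hfc : pvFindClose (pvFirst t) rest with
          | none => rw [hfc] at hqs; simp at hqs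
          | some j =>
            rw [hfc] at hqs
            have hB : sqlIdxLoop (t :: rest) =
                PySem.Str.join " " (t :: rest.take (j + 1)) :: sqlIdxLoop (rest.drop (j + 1)) := by
              rw [sqlIdxLoop]; simp only [hfc]
              rw [if_neg hcond]
            have hlen : (rest.drop (j + 1)).length ≤ n := by
              simp only [List.length_drop]; omega
            rw [hA, sqlAggLoop_open t rest [] acc, hfc, hB]
            exact (ih (rest.drop (j + 1)) hlen hqs
                 (acc ++ [PySem.Str.join " " (t :: rest.take (j + 1))])).trans (by simp)

-- ===== VERDICT (by name: the statement is the Claim_ definition above) =====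
theorem sql_split_spec : Claim_equal_sql_split := by
  intro text _ hpre
  unfold Spec_sql_split sql_split sql_split_alt
  simpa using loops_agree (pvTokens text).length (pvTokens text) le_rfl hpre []
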